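-- pv_equiv track=rewrite | github.com/Unagi-zoso/five-golds-in-a-day | out/production/five-golds-in-a-day/kakao_blind_22_4_re.py | solution
-- ===== SOURCE A (Python) =====
-- def solution(n, info):
--     def cmp(l, r):
--         for i in range(10, -1, -1):
--             if l[i] > r[i]:
--                 return True
--             elif l[i] < r[i]:
--                 return False
--
--     answer = [0]*11
--     max_diff = 0
--     for i in range(1<<10 + 1):
--         lion_score = 0
--         arrow_cnt = 0
--         arrow_info = [0]*11
--         apeach_score = 0
--         for j in range (11):
--             if i & (1<<j):
--                 lion_score += 10-j
--                 arrow_cnt += info[j] + 1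
--                 arrow_info[j] = info[j] + 1
--             else:
--                 if info[j] > 0:
--                     apeach_score += 10-j
--         if arrow_cnt > n:
--             continue
--         arrow_info[10] = n - arrow_cnt
--         cur_diff = lion_score - apeach_score
--         if lion_score > apeach_score:
--             if cur_diff > max_diff:
--                 max_diff = cur_diff
--                 answer = arrow_info
--             elif cur_diff == max_diff and cmp(arrow_info, answer):
--                 answer = arrow_info
--
--     return answer if answer != [0]*11 else [-1]
-- ===== SOURCE B (Python) =====
-- def solution(n, info):
--     def better(l, r):
--         for i in range(10, -1, -1):
--             if l[i] != r[i]: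
--                 return l[i] > r[i]
--         return False
--
--     def consider(lion, apeach, used, arrows, best):
--         if used > n or lion <= apeach:
--             return best
--         cand = arrows[:10] + [n - used]  # arrows still unspent are placed on the last board
--         diff = lion - apeach
--         if diff > best[1] or (diff == best[1] and better(cand, best[0])):
--             return (cand, diff)
--         return best
--
--     def dfs(j, lion, apeach, used, arrows, best):
--         # boards 0..j-1 still undecided; board b scores 10-b and costs info[b]+1 arrows to win
--         if j == 0:
--             return consider(lion, apeach, used, arrows, best)
--         b = j - 1
--         best = dfs(b, lion, apeach + ((10 - b) if info[b] > 0 else 0), used,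
--                    [0] + arrows, best)
--         return dfs(b, lion + (10 - b), apeach, used + info[b] + 1,
--                    [info[b] + 1] + arrows, best)
--
--     best = dfs(11, 0, 0, 0, [], ([0] * 11, 0))
--     return best[0] if best[0] != [0] * 11 else [-1]
-- ===== Notes on version B (the rewrite author's own statement) =====
-- stated objective: alternative
-- what changed: Replaces the 2^11 bitmask loop that rebuilds scores, arrow counts and the arrow array from scratch for every mask with a recursive win-or-concede DFS over the boards that accumulates scores and the arrow list incrementally and evaluates each configuration once at the leaf, where the arrows still unspent are placed on the last board.
import Mathlib
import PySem

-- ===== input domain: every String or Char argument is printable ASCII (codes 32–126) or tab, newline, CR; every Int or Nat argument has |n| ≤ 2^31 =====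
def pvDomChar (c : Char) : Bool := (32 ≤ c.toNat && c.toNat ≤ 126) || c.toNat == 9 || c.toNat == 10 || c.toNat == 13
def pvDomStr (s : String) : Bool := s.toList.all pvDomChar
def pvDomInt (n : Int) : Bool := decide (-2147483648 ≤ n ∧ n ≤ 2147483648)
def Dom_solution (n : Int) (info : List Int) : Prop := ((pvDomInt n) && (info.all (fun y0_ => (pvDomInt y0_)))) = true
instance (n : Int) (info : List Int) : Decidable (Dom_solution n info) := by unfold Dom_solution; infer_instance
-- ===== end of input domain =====

-- B replaces A's 2^11 bitmask loop (which recomputes scores and the arrow array per mask)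
-- by a recursive DFS that wins or concedes each board in turn, accumulating the state
-- incrementally; arrows still unspent are placed on the last board at the leaf.


-- ===== PORT A =====
-- 'cmp(l, r)': both arguments always have length 11, so the indices 10..0 are in range
-- and pyGetD is exact; the final 'return None' is only ever used as a falsy value → false.
def cmpAGo (l r : List Int) : List Int → Bool
  | [] => false
  | i :: is =>
    if PySem.List.pyGetD l i 0 > PySem.List.pyGetD r i 0 then true
    else if PySem.List.pyGetD l i 0 < PySem.List.pyGetD r i 0 then false
    else cmpAGo l r is

def cmpA (l r : List Int) : Bool := cmpAGo l r (PySem.List.pyRange 10 (-1) (-1))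

-- one step of A's inner 'for j in range(11)' loop; state = (lion_score, arrow_cnt, arrow_info, apeach_score).
-- 'i & (1 << j)' with i ∈ [0, 2048) and j ∈ [0, 11): both nonnegative, so Nat.testBit is exact here.
-- 'info[j]' : exact via pyGetD under Pre_ (11 ≤ info.length); out of range Python raises IndexError.
def innerStepA (info : List Int) (i : Int) (st : Int × Int × List Int × Int) (j : Int) :
    Int × Int × List Int × Int :=
  let (lion, cnt, ai, ap) := st
  if i.toNat.testBit j.toNat then
    (lion + (10 - j), cnt + (PySem.List.pyGetD info j 0 + 1),
      PySem.List.pySetD ai j (PySem.List.pyGetD info j 0 + 1), ap)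
  else if PySem.List.pyGetD info j 0 > 0 then (lion, cnt, ai, ap + (10 - j))
  else (lion, cnt, ai, ap)

-- one iteration of A's outer mask loop; state = (answer, max_diff)
def maskStepA (n : Int) (info : List Int) (st : List Int × Int) (i : Int) : List Int × Int :=
  let r := (PySem.List.pyRange 0 11).foldl (innerStepA info i) (0, 0, List.replicate 11 0, 0)
  let lion := r.1; let cnt := r.2.1; let ai := r.2.2.1; let ap := r.2.2.2
  if cnt > n then st
  else
    let ai := PySem.List.pySetD ai 10 (n - cnt)
    let cur := lion - ap
    if lion > ap then
      if cur > st.2 then (ai, cur)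
      else if cur = st.2 ∧ cmpA ai st.1 then (ai, st.2)
      else st
    else st

def solution (n : Int) (info : List Int) : List Int :=
  let st := (PySem.List.pyRange 0 (1 <<< (10 + 1))).foldl (maskStepA n info)
      (List.replicate 11 0, 0)
  if st.1 ≠ List.replicate 11 0 then st.1 else [-1]

-- ===== PORT B =====
def betterGo (l r : List Int) : List Int → Bool
  | [] => false
  | i :: is =>
    if PySem.List.pyGetD l i 0 ≠ PySem.List.pyGetD r i 0 then
      PySem.List.pyGetD l i 0 > PySem.List.pyGetD r i 0
    else betterGo l r is

def betterB (l r : List Int) : Bool := betterGo l r (PySem.List.pyRange 10 (-1) (-1))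

-- 'arrows[:10]': a slice with nonnegative bounds is exactly List.take
def considerB (n lion apeach used : Int) (arrows : List Int)
    (best : List Int × Int) : List Int × Int :=
  if used > n ∨ lion ≤ apeach then best
  else
    let cand := arrows.take 10 ++ [n - used]
    let diff := lion - apeach
    if diff > best.2 ∨ (diff = best.2 ∧ betterB cand best.1) then (cand, diff) else best

-- DFS over the j boards still undecided; board b scores 10-b and costs info[b]+1 arrows to win
def dfsB (n : Int) (info : List Int) :
    Nat → Int → Int → Int → List Int → (List Int × Int) → List Int × Int
  | 0, lion, ap, used, arrows, best => considerB n lion ap used arrows best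
  | j + 1, lion, ap, used, arrows, best =>
    let b : Int := (j : Int)
    let best := dfsB n info j lion
      (ap + (if PySem.List.pyGetD info b 0 > 0 then 10 - b else 0)) used (0 :: arrows) best
    dfsB n info j (lion + (10 - b)) ap (used + PySem.List.pyGetD info b 0 + 1)
      ((PySem.List.pyGetD info b 0 + 1) :: arrows) best

def solution_alt (n : Int) (info : List Int) : List Int :=
  let best := dfsB n info 11 0 0 0 [] (List.replicate 11 0, 0)
  if best.1 ≠ List.replicate 11 0 then best.1 else [-1]

-- ===== PRECONDITION & SPEC =====
-- A reads info[0]..info[10]; on shorter lists Python raises IndexError, excluded here.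
def Pre_solution (n : Int) (info : List Int) : Prop := 11 ≤ info.length
instance (n : Int) (info : List Int) : Decidable (Pre_solution n info) := by
  unfold Pre_solution; infer_instance
def pvWitness_solution : Int × List Int := (5, [2, 1, 1, 1, 0, 0, 0, 0, 0, 0, 0])

def Spec_solution (n : Int) (info : List Int) (out : List Int) : Prop := out = solution_alt n info
instance (n : Int) (info : List Int) (out : List Int) : Decidable (Spec_solution n info out) := by
  unfold Spec_solution; infer_instance

-- ===== CLAIM (what is proved, stated in full; the proofs are below) =====
def Claim_equal_solution : Prop :=
  ∀ (n : Int) (info : List Int), Dom_solution n info → Pre_solution n info →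
    Spec_solution n info (solution n info)

-- ===== LEMMAS AND PROOFS =====
-- (everything below is proof-side helper material)

-- decision lists: ds[k] = true ⇔ Lion shoots board k out (bit k of A's mask)
def maskOf : List Bool → Nat
  | [] => 0
  | d :: ds => (if d then 1 else 0) + 2 * maskOf ds

-- all decision lists of length j, in the order A's masks 0,1,…,2^j-1 enumerate them
def allds : Nat → List (List Bool)
  | 0 => [[]]
  | j + 1 => (allds j).map (fun ds => ds ++ [false]) ++ (allds j).map (· ++ [true])

-- the configuration described by decisions ds for boards k, k+1, …:
-- (lion_score, apeach_score, arrows_used, arrow entries for those boards)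
def cand (info : List Int) : Nat → List Bool → Int × Int × Int × List Int
  | _, [] => (0, 0, 0, [])
  | k, d :: ds =>
    let c := cand info (k + 1) ds
    let v := PySem.List.pyGetD info (k : Int) 0
    if d then (c.1 + (10 - (k : Int)), c.2.1, c.2.2.1 + (v + 1), (v + 1) :: c.2.2.2)
    else (c.1, c.2.1 + (if v > 0 then 10 - (k : Int) else 0), c.2.2.1, 0 :: c.2.2.2)

-- the per-configuration update A performs, as a function of the (length-11) decisions ds
def stepC (n : Int) (info : List Int) (st : List Int × Int) (ds : List Bool) : List Int × Int :=
  considerB n (cand info 0 ds).1 (cand info 0 ds).2.1 (cand info 0 ds).2.2.1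
    (cand info 0 ds).2.2.2 st

theorem cmpAGo_eq_betterGo (l r : List Int) (is : List Int) :
    cmpAGo l r is = betterGo l r is := by
  induction is with
  | nil => rfl
  | cons i is ih =>
    simp only [cmpAGo, betterGo]
    rcases lt_trichotomy (PySem.List.pyGetD l i 0) (PySem.List.pyGetD r i 0) with h | h | h <;>
      split_ifs <;> simp_all

theorem cmpA_eq_betterB (l r : List Int) : cmpA l r = betterB l r :=
  cmpAGo_eq_betterGo l r _

theorem testBit_maskOf (ds : List Bool) (k : Nat) :
    (maskOf ds).testBit k = ds.getD k false := by
  induction ds generalizing k with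
  | nil => simp [maskOf, Nat.zero_testBit]
  | cons d ds ih =>
    cases k with
    | zero =>
      rw [Nat.testBit_zero]
      cases d <;> simp [maskOf] <;> omega
    | succ k =>
      rw [Nat.testBit_add_one]
      have h2 : ((if d then 1 else 0) + 2 * maskOf ds) / 2 = maskOf ds := by
        cases d <;> simp <;> omega
      simp only [maskOf, h2, ih, List.getD]
      rfl

theorem maskOf_append (ds : List Bool) (d : Bool) :
    maskOf (ds ++ [d]) = maskOf ds + (if d then 2 ^ ds.length else 0) := by
  induction ds with
  | nil => cases d <;> simp [maskOf]
  | cons e ds ih =>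
    simp only [List.cons_append, maskOf, ih, List.length_cons]
    cases d <;> simp [pow_succ] <;> ring

theorem length_of_mem_allds (j : Nat) (ds : List Bool) (h : ds ∈ allds j) : ds.length = j := by
  induction j generalizing ds with
  | zero => simp [allds] at h; simp [h]
  | succ j ih =>
    simp only [allds, List.mem_append, List.mem_map] at h
    rcases h with ⟨e, he, rfl⟩ | ⟨e, he, rfl⟩ <;> simp [ih e he]

theorem map_maskOf_allds (j : Nat) : (allds j).map maskOf = List.range (2 ^ j) := by
  induction j with
  | zero => simp [allds, maskOf]
  | succ j ih =>
    have hfalse : (allds j).map (fun ds => maskOf (ds ++ [false])) = (allds j).map maskOf := by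
      apply List.map_congr_left
      intro ds hds
      rw [maskOf_append]; simp
    have htrue : (allds j).map (fun ds => maskOf (ds ++ [true])) =
        (allds j).map (fun ds => maskOf ds + 2 ^ j) := by
      apply List.map_congr_left
      intro ds hds
      rw [maskOf_append]; simp [length_of_mem_allds j ds hds]
    have h2 : (2 : Nat) ^ (j + 1) = 2 ^ j + 2 ^ j := by ring
    rw [allds, List.map_append, List.map_map, List.map_map]
    rw [show ((maskOf ∘ fun ds => ds ++ [false]) = fun ds => maskOf (ds ++ [false])) from rfl]
    rw [show ((maskOf ∘ fun ds => ds ++ [true]) = fun ds => maskOf (ds ++ [true])) from rfl]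
    rw [hfalse, htrue, h2, List.range_add, ih]
    congr 1
    rw [← ih, List.map_map]
    apply List.map_congr_left
    intro ds _
    simp [Nat.add_comm]

theorem cand_length (info : List Int) (k : Nat) (ds : List Bool) :
    (cand info k ds).2.2.2.length = ds.length := by
  induction ds generalizing k with
  | nil => simp [cand]
  | cons d ds ih =>
    simp only [cand]
    split_ifs <;> simp [ih]

theorem cand_snoc (info : List Int) (k : Nat) (ds : List Bool) (d : Bool) :
    cand info k (ds ++ [d]) =
      (let c := cand info k ds
       let b : Nat := k + ds.length
       let v := PySem.List.pyGetD info (b : Int) 0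
       if d then (c.1 + (10 - (b : Int)), c.2.1, c.2.2.1 + (v + 1), c.2.2.2 ++ [v + 1])
       else (c.1, c.2.1 + (if v > 0 then 10 - (b : Int) else 0), c.2.2.1, c.2.2.2 ++ [0])) := by
  induction ds generalizing k with
  | nil => cases d <;> simp [cand]
  | cons e ds ih =>
    simp only [List.cons_append, cand, ih, List.length_cons]
    have hb : k + (ds.length + 1) = (k + 1) + ds.length := by omega
    rw [hb]
    cases d <;> cases e <;> simp <;> and_intros <;> push_cast <;> ring

-- characterization of A's inner loop over boards k..10
theorem innerA_char (info : List Int) (m : Nat) (ds : List Bool) (k : Nat)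
    (hk : k + ds.length = 11)
    (Hb : ∀ i : Nat, m.testBit (k + i) = ds.getD i false)
    (l0 u0 a0 : Int) (ai0 : List Int) (hlen : ai0.length = 11)
    (hdrop : ai0.drop k = List.replicate (11 - k) 0) :
    (PySem.List.pyRange (k : Int) 11).foldl (innerStepA info (m : Int)) (l0, u0, ai0, a0) =
      (l0 + (cand info k ds).1, u0 + (cand info k ds).2.2.1,
        ai0.take k ++ (cand info k ds).2.2.2, a0 + (cand info k ds).2.1) := by
  induction ds generalizing k l0 u0 a0 ai0 with
  | nil =>
    have hk11 : k = 11 := by simpa using hk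
    subst hk11
    rw [PySem.List.pyRange_one_eq_nil (by norm_num)]
    simp [cand, List.take_of_length_le (le_of_eq hlen)]
  | cons d ds ih =>
    have hl : k + (ds.length + 1) = 11 := by simpa using hk
    have hklt : (k : Int) < 11 := by omega
    rw [PySem.List.pyRange_one_cons hklt]
    rw [show ((k : Int) + 1) = ((k + 1 : Nat) : Int) by push_cast; ring]
    rw [List.foldl_cons]
    have hbit : m.testBit k = d := by
      have := Hb 0; simpa using this
    have hk' : (k + 1) + ds.length = 11 := by omega
    have Hb' : ∀ i : Nat, m.testBit ((k + 1) + i) = ds.getD i false := by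
      intro i
      have := Hb (i + 1)
      rw [show k + (i + 1) = (k + 1) + i by omega] at this
      simpa using this
    have hgetk : ai0[k]? = some 0 := by
      have h1 : (ai0.drop k)[0]? = ai0[k]? := by
        simp [List.getElem?_drop]
      have h2 : (List.replicate (11 - k) 0 : List Int)[0]? = some 0 := by
        have : 0 < 11 - k := by omega
        simp [this]
      rw [← h1, hdrop, h2]
    have htake : ai0.take (k + 1) = ai0.take k ++ [0] := by
      rw [List.take_add_one, hgetk]; rfl
    have hdroptl : ai0.drop (k + 1) = List.replicate (11 - (k + 1)) 0 := by
      rw [← List.tail_drop, hdrop]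
      rw [show 11 - k = (11 - (k + 1)) + 1 by omega]
      simp [List.replicate_succ]
    have hkl : k < ai0.length := by omega
    cases d with
    | true =>
      simp only [innerStepA, Int.toNat_natCast, hbit, if_true]
      set v := PySem.List.pyGetD info (k : Int) 0 with hvdef
      have hset : PySem.List.pySetD ai0 ((k : Nat) : Int) (v + 1) = ai0.set k (v + 1) :=
        PySem.List.pySetD_natCast _ _ _
      rw [hset]
      have hdrop' : (ai0.set k (v + 1)).drop (k + 1) = List.replicate (11 - (k + 1)) 0 := by
        rw [List.drop_set, if_pos (by omega)]
        exact hdroptl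
      rw [ih (k + 1) hk' Hb' _ _ _ _ (by simp [hlen]) hdrop']
      have htakeset : (ai0.set k (v + 1)).take (k + 1) = ai0.take k ++ [v + 1] := by
        rw [List.take_add_one, List.take_set, List.getElem?_set_self hkl,
          List.set_eq_of_length_le (by simp)]
        simp
      simp only [cand, htakeset, if_true, Prod.mk.injEq, List.append_assoc,
        List.singleton_append]
      and_intros <;> first | trivial | ring
    | false =>
      simp only [innerStepA, Int.toNat_natCast, hbit, Bool.false_eq_true, if_false]
      have hmain : List.foldl (innerStepA info (m : Int)) (l0, u0, ai0, a0 +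
          (if 0 < PySem.List.pyGetD info (k : Int) 0 then 10 - (k : Int) else 0))
          (PySem.List.pyRange ((k + 1 : Nat) : Int) 11) =
          (l0 + (cand info k (false :: ds)).1, u0 + (cand info k (false :: ds)).2.2.1,
            ai0.take k ++ (cand info k (false :: ds)).2.2.2,
            a0 + (cand info k (false :: ds)).2.1) := by
        rw [ih (k + 1) hk' Hb' _ _ _ _ hlen hdroptl]
        simp only [cand, htake, Bool.false_eq_true, if_false, Prod.mk.injEq,
          List.append_assoc, List.singleton_append]
        and_intros <;> first | trivial | ring
      by_cases h : 0 < PySem.List.pyGetD info (k : Int) 0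
      · rw [if_pos h]
        rw [← hmain]
        rw [if_pos h]
      · rw [if_neg h]
        rw [← hmain]
        rw [if_neg h]
        simp

theorem maskStep_cand (n : Int) (info : List Int) (ds : List Bool) (h11 : ds.length = 11)
    (st : List Int × Int) :
    maskStepA n info st ((maskOf ds : Nat) : Int) = stepC n info st ds := by
  have Hb : ∀ i : Nat, (maskOf ds).testBit (0 + i) = ds.getD i false := by
    intro i; simpa using testBit_maskOf ds i
  have hinner := innerA_char info (maskOf ds) ds 0 (by simpa using h11) Hb 0 0 0
    (List.replicate 11 0) (by simp) (by simp)
  have hset10 : (cand info 0 ds).2.2.2.set 10 (n - (cand info 0 ds).2.2.1) =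
      (cand info 0 ds).2.2.2.take 10 ++ [n - (cand info 0 ds).2.2.1] := by
    have hpre : (cand info 0 ds).2.2.2.length = 11 := by rw [cand_length, h11]
    rw [List.set_eq_take_append_cons_drop, if_pos (by omega)]
    rw [List.drop_eq_nil_of_le (by omega)]
  unfold maskStepA stepC considerB
  rw [show ((0 : Int) = ((0 : Nat) : Int)) by simp] at hinner ⊢
  rw [hinner]
  simp only [Nat.cast_zero, zero_add, List.take_zero, List.nil_append]
  rw [show (((10 : Int)) = ((10 : Nat) : Int)) by simp, PySem.List.pySetD_natCast, hset10]
  rw [cmpA_eq_betterB]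
  set cnt := (cand info 0 ds).2.2.1
  set lion := (cand info 0 ds).1
  set ap := (cand info 0 ds).2.1
  set ai := List.take 10 (cand info 0 ds).2.2.2 ++ [n - cnt]
  by_cases hc : cnt > n
  · rw [if_pos hc, if_pos (show cnt > n ∨ lion ≤ ap from Or.inl hc)]
  · by_cases hl : lion > ap
    · by_cases hgt : lion - ap > st.2
      · rw [if_neg hc, if_pos hl, if_pos hgt,
          if_neg (show ¬(cnt > n ∨ lion ≤ ap) from by rw [not_or]; exact ⟨hc, by omega⟩),
          if_pos (show lion - ap > st.2 ∨ (lion - ap = st.2 ∧ betterB ai st.1 = true)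
            from Or.inl hgt)]
      · by_cases heq : lion - ap = st.2 ∧ betterB ai st.1 = true
        · rw [if_neg hc, if_pos hl, if_neg hgt, if_pos heq,
            if_neg (show ¬(cnt > n ∨ lion ≤ ap) from by rw [not_or]; exact ⟨hc, by omega⟩),
            if_pos (show lion - ap > st.2 ∨ (lion - ap = st.2 ∧ betterB ai st.1 = true)
              from Or.inr heq), heq.1]
        · rw [if_neg hc, if_pos hl, if_neg hgt, if_neg heq,
            if_neg (show ¬(cnt > n ∨ lion ≤ ap) from by rw [not_or]; exact ⟨hc, by omega⟩),
            if_neg (show ¬(lion - ap > st.2 ∨ (lion - ap = st.2 ∧ betterB ai st.1 = true))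
              from by rintro (h | h); exacts [hgt h, heq h])]
    · rw [if_neg hc, if_neg hl,
        if_pos (show cnt > n ∨ lion ≤ ap from Or.inr (by omega))]

theorem foldA_eq (n : Int) (info : List Int) (init : List Int × Int) :
    (PySem.List.pyRange 0 (1 <<< (10 + 1))).foldl (maskStepA n info) init =
      (allds 11).foldl (stepC n info) init := by
  rw [show ((1 <<< (10 + 1) : Int)) = ((2048 : Nat) : Int) by decide]
  rw [PySem.List.pyRange_zero_natCast, show (2048 : Nat) = 2 ^ 11 by norm_num]
  rw [← map_maskOf_allds 11, List.foldl_map, List.foldl_map]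
  apply PySem.List.foldl_congr_mem
  intro acc ds hds
  exact maskStep_cand n info ds (length_of_mem_allds 11 ds hds) acc

-- ---- B's DFS is the fold of stepC over allds 11 ----

def stepDB (n : Int) (info : List Int) (lion ap used : Int) (pre : List Int)
    (st : List Int × Int) (ds : List Bool) : List Int × Int :=
  considerB n (lion + (cand info 0 ds).1) (ap + (cand info 0 ds).2.1)
    (used + (cand info 0 ds).2.2.1) ((cand info 0 ds).2.2.2 ++ pre) st

theorem considerB_congr {n l1 l2 a1 a2 u1 u2 : Int} {p1 p2 : List Int}
    (o : List Int × Int)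
    (hl : l1 = l2) (ha : a1 = a2) (hu : u1 = u2) (hp : p1 = p2) :
    considerB n l1 a1 u1 p1 o = considerB n l2 a2 u2 p2 o := by
  subst hl; subst ha; subst hu; subst hp; rfl

theorem dfsB_char (n : Int) (info : List Int) (j : Nat) :
    ∀ (lion ap used : Int) (pre : List Int) (o : List Int × Int),
      dfsB n info j lion ap used pre o =
        (allds j).foldl (stepDB n info lion ap used pre) o := by
  induction j with
  | zero =>
    intro lion ap used pre o
    show considerB n lion ap used pre o = stepDB n info lion ap used pre o []
    unfold stepDB
    exact (considerB_congr o (by simp [cand]) (by simp [cand]) (by simp [cand])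
      (by simp [cand])).symm
  | succ j ih =>
    intro lion ap used pre o
    rw [dfsB]
    rw [ih, ih]
    rw [allds, List.foldl_append, List.foldl_map, List.foldl_map]
    have h1 : List.foldl (fun (x : List Int × Int) (y : List Bool) =>
          stepDB n info lion ap used pre x (y ++ [false])) o (allds j) =
        List.foldl (stepDB n info lion
          (ap + (if PySem.List.pyGetD info (j : Int) 0 > 0 then 10 - (j : Int) else 0))
          used (0 :: pre)) o (allds j) := by
      apply PySem.List.foldl_congr_mem
      intro acc ds hds
      unfold stepDB
      rw [cand_snoc]
      simp only [length_of_mem_allds j ds hds, Nat.zero_add, Bool.false_eq_true, if_false]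
      apply considerB_congr
      · rfl
      · ring
      · rfl
      · simp
    rw [h1]
    apply PySem.List.foldl_congr_mem
    intro acc ds hds
    unfold stepDB
    rw [cand_snoc]
    simp only [length_of_mem_allds j ds hds, Nat.zero_add, if_true]
    apply considerB_congr
    · ring
    · rfl
    · ring
    · simp

theorem foldB_eq (n : Int) (info : List Int) (init : List Int × Int) :
    dfsB n info 11 0 0 0 [] init = (allds 11).foldl (stepC n info) init := by
  rw [dfsB_char n info 11]
  apply PySem.List.foldl_congr_mem
  intro acc ds _
  unfold stepDB stepC
  apply considerB_congr <;> simp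

-- ---- main equivalence ----

theorem solution_main (n : Int) (info : List Int) : solution n info = solution_alt n info := by
  unfold solution solution_alt
  rw [foldA_eq, foldB_eq]

-- ===== VERDICT (by name: the statement is the Claim_ definition above) =====
theorem solution_spec : Claim_equal_solution := by
  intro n info _ _
  unfold Spec_solution
  exact solution_main n info
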